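-- pv_equiv track=rewrite | github.com/TimothySamson/bioinformatics | course2/week2.py | DegreeList
-- ===== SOURCE A (Python) =====
-- def DegreeList(adjList):
--     degree = {}
--
--     for node, neighbors in adjList.items():
--         # initialize degree dict
--         for vertex in neighbors + [node]:
--             if vertex not in degree:
--                 degree[vertex] = {"in": 0, "out": 0}
--
--         degree[node]["out"] = len(neighbors)
--         for neighbor in neighbors:
--             degree[neighbor]["in"] += 1
--
--     return degree
-- ===== SOURCE B (Python) =====
-- def DegreeList(adjList):
--     # Staged, sort-based computation: the in-degrees are read off as run lengths
--     # of the sorted target list; out-degrees are the neighbor-list sizes.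
--     vertices = dict.fromkeys(v for node, nbrs in adjList.items() for v in (*nbrs, node))
--     targets = sorted(v for nbrs in adjList.values() for v in nbrs)
--     indeg = {}
--     prev = None
--     run = 0
--     for v in targets:
--         if v == prev:
--             run += 1
--         else:
--             if prev is not None:
--                 indeg[prev] = run
--             prev = v
--             run = 1
--     if prev is not None:
--         indeg[prev] = run
--     outdeg = {node: len(nbrs) for node, nbrs in adjList.items()}
--     return {v: {"in": indeg.get(v, 0), "out": outdeg.get(v, 0)} for v in vertices}
-- ===== Notes on version B (the rewrite author's own statement) =====
-- stated objective: alternative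
-- what changed: A incrementally mutates one nested dict (initialize a record per fresh vertex, bump a counter per edge); B is staged: an ordered key set via dict.fromkeys, then in-degrees obtained by SORTING the flat target list and run-length encoding it, an out-degree size map, and a final assembling comprehension.
import Mathlib
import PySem

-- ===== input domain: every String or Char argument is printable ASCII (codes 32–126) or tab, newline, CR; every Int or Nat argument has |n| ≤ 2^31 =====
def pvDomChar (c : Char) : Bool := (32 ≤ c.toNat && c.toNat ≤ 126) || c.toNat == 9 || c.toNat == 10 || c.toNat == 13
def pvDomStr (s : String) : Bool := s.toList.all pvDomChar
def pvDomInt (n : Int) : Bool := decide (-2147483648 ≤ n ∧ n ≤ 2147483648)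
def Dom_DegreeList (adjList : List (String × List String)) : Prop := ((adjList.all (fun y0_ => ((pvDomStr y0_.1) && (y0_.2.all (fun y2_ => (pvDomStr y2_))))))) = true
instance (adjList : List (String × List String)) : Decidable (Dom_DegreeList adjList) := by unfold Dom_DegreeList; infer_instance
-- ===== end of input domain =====

-- B replaces A's incremental mutation of one nested dict by staged passes: ordered key
-- dedup, then in-degrees as run lengths of the SORTED target list, then out-degree sizes (objective: alternative).

-- ===== PORT A =====
-- one step of A's outer loop (p = (node, neighbors))
def pvStepA (degree : PySem.Dict String (PySem.Dict String Int)) (p : String × List String) :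
    PySem.Dict String (PySem.Dict String Int) :=
  -- for vertex in neighbors + [node]: if vertex not in degree: degree[vertex] = {"in": 0, "out": 0}
  let degree := (p.2 ++ [p.1]).foldl (fun d vertex =>
    if !(d.contains vertex) then d.insert vertex (PySem.Dict.ofList [("in", (0 : Int)), ("out", 0)]) else d) degree
  -- degree[node]["out"] = len(neighbors)  (node is present after the init loop, so the default is never used)
  let degree := degree.modify p.1 PySem.Dict.empty (fun inner => inner.insert "out" (p.2.length : Int))
  -- for neighbor in neighbors: degree[neighbor]["in"] += 1  ("in" is always present, so getD's default is never used)
  p.2.foldl (fun d neighbor =>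
    d.modify neighbor PySem.Dict.empty (fun inner => inner.insert "in" (inner.getD "in" 0 + 1))) degree

def DegreeList (adjList : List (String × List String)) : List (String × List (String × Int)) :=
  let degree := adjList.foldl pvStepA PySem.Dict.empty
  degree.items.map (fun q => (q.1, q.2.items))

-- ===== PORT B =====
-- state = (indeg, prev, run); one step of B's run-length loop over the sorted target list
def pvRun (st : PySem.Dict String Int × Option String × Int) (v : String) :
    PySem.Dict String Int × Option String × Int :=
  if some v == st.2.1 then (st.1, st.2.1, st.2.2 + 1)
  else ((match st.2.1 with | none => st.1 | some p => st.1.insert p st.2.2), some v, 1)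

-- the trailing 'if prev is not None: indeg[prev] = run'
def pvFlush (st : PySem.Dict String Int × Option String × Int) : PySem.Dict String Int :=
  match st.2.1 with | none => st.1 | some p => st.1.insert p st.2.2

def DegreeList_alt (adjList : List (String × List String)) : List (String × List (String × Int)) :=
  -- vertices = dict.fromkeys(...): keys in first-seen order, duplicates dropped
  let vertices := PySem.List.dedup (adjList.flatMap (fun p => p.2 ++ [p.1]))
  -- targets = sorted(v for nbrs in adjList.values() for v in nbrs)
  let targets := PySem.List.sorted (adjList.flatMap (fun p => p.2)) (fun v => v) false
  -- run-length loop over targets, then the trailing flush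
  let indeg := pvFlush (targets.foldl pvRun (PySem.Dict.empty, none, 0))
  -- outdeg = {node: len(nbrs) ...}
  let outdeg := adjList.foldl (fun (d : PySem.Dict String Int) p => d.insert p.1 (p.2.length : Int)) PySem.Dict.empty
  -- {v: {"in": indeg.get(v, 0), "out": outdeg.get(v, 0)} for v in vertices}
  vertices.map (fun v => (v, [("in", indeg.getD v 0), ("out", outdeg.getD v 0)]))

-- ===== PRECONDITION & SPEC =====
def Spec_DegreeList (adjList : List (String × List String)) (out : List (String × List (String × Int))) : Prop := out = DegreeList_alt adjList
instance (adjList : List (String × List String)) (out : List (String × List (String × Int))) : Decidable (Spec_DegreeList adjList out) := by unfold Spec_DegreeList; infer_instance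

-- ===== CLAIM (what is proved, stated in full; the proofs are below) =====
def Claim_equal_DegreeList : Prop := ∀ (adjList : List (String × List String)), Dom_DegreeList adjList → Spec_DegreeList adjList (DegreeList adjList)

-- ===== LEMMAS AND PROOFS =====

-- the record A keeps for vertex v, expressed through in/out-degree tables
def pvRecD (indeg outdeg : PySem.Dict String Int) (v : String) : String × PySem.Dict String Int :=
  (v, PySem.Dict.mk [("in", indeg.getD v 0), ("out", outdeg.getD v 0)])

-- ordered dedup extension and in-degree accumulation, as standalone folds
def pvOrd (ns : List String) (order : List String) : List String :=
  ns.foldl (fun o v => if v ∈ o then o else o ++ [v]) order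

def pvInc (ns : List String) (indeg : PySem.Dict String Int) : PySem.Dict String Int :=
  ns.foldl (fun d v => d.insert v (d.getD v 0 + 1)) indeg

theorem mem_pvOrd (ns : List String) (order : List String) (v : String) :
    v ∈ pvOrd ns order ↔ v ∈ order ∨ v ∈ ns := by
  induction ns generalizing order with
  | nil => simp [pvOrd]
  | cons a ns ih =>
    simp only [pvOrd, List.foldl_cons] at *
    by_cases h : a ∈ order
    · rw [if_pos h, ih]
      simp only [List.mem_cons]
      constructor
      · rintro (h1 | h1)
        exacts [Or.inl h1, Or.inr (Or.inr h1)]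
      · rintro (h1 | rfl | h1)
        exacts [Or.inl h1, Or.inl h, Or.inr h1]
    · rw [if_neg h, ih]
      simp only [List.mem_append, List.mem_cons]
      tauto

theorem nodup_pvOrd (ns : List String) (order : List String) (h : order.Nodup) :
    (pvOrd ns order).Nodup := by
  induction ns generalizing order with
  | nil => exact h
  | cons a ns ih =>
    simp only [pvOrd, List.foldl_cons]
    by_cases ha : a ∈ order
    · simp only [ha, if_true]; exact ih _ h
    · simp only [ha, if_false]
      refine ih _ ?_
      simp only [List.nodup_append, List.nodup_singleton, h, true_and]
      intro x hx y hy
      rw [List.mem_singleton] at hy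
      subst hy
      exact fun e => ha (e ▸ hx)

theorem keys_mk_map (order : List String) (indeg outdeg : PySem.Dict String Int) :
    (PySem.Dict.mk (order.map (pvRecD indeg outdeg))).keys = order := by
  simp [PySem.Dict.keys, List.map_map, Function.comp_def, pvRecD]

theorem contains_mk_map (order : List String) (indeg outdeg : PySem.Dict String Int) (v : String) :
    (PySem.Dict.mk (order.map (pvRecD indeg outdeg))).contains v = decide (v ∈ order) := by
  rw [PySem.Dict.contains_eq_decide_mem_keys, keys_mk_map]

theorem getD_mk_map (order : List String) (indeg outdeg : PySem.Dict String Int) (v : String)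
    (hnd : order.Nodup) (hv : v ∈ order) :
    (PySem.Dict.mk (order.map (pvRecD indeg outdeg))).getD v PySem.Dict.empty
      = PySem.Dict.mk [("in", indeg.getD v 0), ("out", outdeg.getD v 0)] := by
  apply PySem.Dict.getD_of_mem_items (d := PySem.Dict.mk (order.map (pvRecD indeg outdeg)))
  · exact List.mem_map.mpr ⟨v, hv, rfl⟩
  · rw [keys_mk_map]; exact hnd

theorem inner_set_out (i o L : Int) :
    (PySem.Dict.mk [("in", i), ("out", o)]).insert "out" L = PySem.Dict.mk [("in", i), ("out", L)] := by
  apply PySem.Dict.ext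
  simp [PySem.Dict.items_insert_of_contains]

theorem inner_set_in (i o L : Int) :
    (PySem.Dict.mk [("in", i), ("out", o)]).insert "in" L = PySem.Dict.mk [("in", L), ("out", o)] := by
  apply PySem.Dict.ext
  simp [PySem.Dict.items_insert_of_contains]

theorem inner_getD_in (i o : Int) :
    (PySem.Dict.mk [("in", i), ("out", o)]).getD "in" 0 = i := rfl

-- overwriting the record of one vertex present in order = inserting into the corresponding table
theorem modify_out (order : List String) (indeg outdeg : PySem.Dict String Int) (node : String) (L : Int)
    (hnd : order.Nodup) (hmem : node ∈ order) :
    (PySem.Dict.mk (order.map (pvRecD indeg outdeg))).modify node PySem.Dict.empty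
        (fun inner => inner.insert "out" L)
      = PySem.Dict.mk (order.map (pvRecD indeg (outdeg.insert node L))) := by
  have hm : (PySem.Dict.mk (order.map (pvRecD indeg outdeg))).modify node PySem.Dict.empty
      (fun inner => inner.insert "out" L)
    = (PySem.Dict.mk (order.map (pvRecD indeg outdeg))).insert node
        (((PySem.Dict.mk (order.map (pvRecD indeg outdeg))).getD node PySem.Dict.empty).insert "out" L) := rfl
  rw [hm, getD_mk_map order indeg outdeg node hnd hmem, inner_set_out]
  apply PySem.Dict.ext
  rw [PySem.Dict.items_insert_of_contains _ _ (by rw [contains_mk_map]; exact decide_eq_true hmem)]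
  show (order.map (pvRecD indeg outdeg)).map
      (fun p => if (p.1 == node) = true then (node, PySem.Dict.mk [("in", indeg.getD node 0), ("out", L)]) else p)
    = order.map (pvRecD indeg (outdeg.insert node L))
  rw [List.map_map]
  apply List.map_congr_left
  intro v hv
  by_cases hvn : v = node
  · subst hvn
    simp [pvRecD, PySem.Dict.getD_insert_self]
  · simp only [Function.comp_apply, pvRecD, beq_iff_eq, if_neg hvn]
    rw [PySem.Dict.getD_insert]
    simp [hvn]

theorem modify_in (order : List String) (indeg outdeg : PySem.Dict String Int) (nb : String)
    (hnd : order.Nodup) (hmem : nb ∈ order) :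
    (PySem.Dict.mk (order.map (pvRecD indeg outdeg))).modify nb PySem.Dict.empty
        (fun inner => inner.insert "in" (inner.getD "in" 0 + 1))
      = PySem.Dict.mk (order.map (pvRecD (indeg.insert nb (indeg.getD nb 0 + 1)) outdeg)) := by
  have hm : (PySem.Dict.mk (order.map (pvRecD indeg outdeg))).modify nb PySem.Dict.empty
      (fun inner => inner.insert "in" (inner.getD "in" 0 + 1))
    = (PySem.Dict.mk (order.map (pvRecD indeg outdeg))).insert nb
        (let inner := (PySem.Dict.mk (order.map (pvRecD indeg outdeg))).getD nb PySem.Dict.empty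
         inner.insert "in" (inner.getD "in" 0 + 1)) := rfl
  rw [hm]
  simp only [getD_mk_map order indeg outdeg nb hnd hmem, inner_getD_in, inner_set_in]
  apply PySem.Dict.ext
  rw [PySem.Dict.items_insert_of_contains _ _ (by rw [contains_mk_map]; exact decide_eq_true hmem)]
  show (order.map (pvRecD indeg outdeg)).map
      (fun p => if (p.1 == nb) = true then (nb, PySem.Dict.mk [("in", indeg.getD nb 0 + 1), ("out", outdeg.getD nb 0)]) else p)
    = order.map (pvRecD (indeg.insert nb (indeg.getD nb 0 + 1)) outdeg)
  rw [List.map_map]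
  apply List.map_congr_left
  intro v hv
  by_cases hvn : v = nb
  · subst hvn
    simp [pvRecD, PySem.Dict.getD_insert_self]
  · simp only [Function.comp_apply, pvRecD, beq_iff_eq, if_neg hvn]
    rw [PySem.Dict.getD_insert]
    simp [hvn]

-- A's init loop only appends fresh vertices, in pvOrd order
theorem initA (ns : List String) (order : List String) (indeg outdeg : PySem.Dict String Int)
    (hin : ∀ v, v ∉ order → indeg.getD v 0 = 0) (hout : ∀ v, v ∉ order → outdeg.getD v 0 = 0) :
    ns.foldl (fun d vertex =>
        if !(d.contains vertex) then d.insert vertex (PySem.Dict.ofList [("in", (0 : Int)), ("out", 0)]) else d)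
      (PySem.Dict.mk (order.map (pvRecD indeg outdeg)))
      = PySem.Dict.mk ((pvOrd ns order).map (pvRecD indeg outdeg)) := by
  induction ns generalizing order with
  | nil => rfl
  | cons a ns ih =>
    simp only [List.foldl_cons, pvOrd] at *
    by_cases ha : a ∈ order
    · rw [show (if !((PySem.Dict.mk (order.map (pvRecD indeg outdeg))).contains a)
            then (PySem.Dict.mk (order.map (pvRecD indeg outdeg))).insert a (PySem.Dict.ofList [("in", (0 : Int)), ("out", 0)])
            else PySem.Dict.mk (order.map (pvRecD indeg outdeg)))
          = PySem.Dict.mk (order.map (pvRecD indeg outdeg)) by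
        rw [contains_mk_map]; simp [ha]]
      rw [if_pos ha]
      exact ih order hin hout
    · rw [show (if !((PySem.Dict.mk (order.map (pvRecD indeg outdeg))).contains a)
            then (PySem.Dict.mk (order.map (pvRecD indeg outdeg))).insert a (PySem.Dict.ofList [("in", (0 : Int)), ("out", 0)])
            else PySem.Dict.mk (order.map (pvRecD indeg outdeg)))
          = (PySem.Dict.mk (order.map (pvRecD indeg outdeg))).insert a (PySem.Dict.ofList [("in", (0 : Int)), ("out", 0)]) by
        rw [contains_mk_map]; simp [ha]]
      rw [if_neg ha]
      have hfresh : (PySem.Dict.mk (order.map (pvRecD indeg outdeg))).insert a (PySem.Dict.ofList [("in", (0 : Int)), ("out", 0)])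
          = PySem.Dict.mk ((order ++ [a]).map (pvRecD indeg outdeg)) := by
        apply PySem.Dict.ext
        rw [PySem.Dict.items_insert_of_not_contains _ _ (by rw [contains_mk_map]; simp [ha])]
        show order.map (pvRecD indeg outdeg) ++ [(a, PySem.Dict.ofList [("in", (0 : Int)), ("out", 0)])]
          = (order ++ [a]).map (pvRecD indeg outdeg)
        rw [List.map_append]
        congr 1
        simp only [List.map_cons, List.map_nil, pvRecD, hin a ha, hout a ha]
        rfl
      rw [hfresh]
      refine ih (order ++ [a]) ?_ ?_
      · intro v hv
        exact hin v (fun hvo => hv (List.mem_append.mpr (Or.inl hvo)))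
      · intro v hv
        exact hout v (fun hvo => hv (List.mem_append.mpr (Or.inl hvo)))

-- A's in-degree loop = pvInc, record-wise
theorem incA (ns : List String) (order : List String) (indeg outdeg : PySem.Dict String Int)
    (hnd : order.Nodup) (hmem : ∀ v ∈ ns, v ∈ order) :
    ns.foldl (fun d neighbor =>
        d.modify neighbor PySem.Dict.empty (fun inner => inner.insert "in" (inner.getD "in" 0 + 1)))
      (PySem.Dict.mk (order.map (pvRecD indeg outdeg)))
      = PySem.Dict.mk (order.map (pvRecD (pvInc ns indeg) outdeg)) := by
  induction ns generalizing indeg with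
  | nil => rfl
  | cons a ns ih =>
    simp only [List.foldl_cons, pvInc]
    rw [modify_in order indeg outdeg a hnd (hmem a (by simp))]
    exact ih _ (fun v hv => hmem v (by simp [hv]))

theorem getD_pvInc (ns : List String) (indeg : PySem.Dict String Int) (v : String) :
    (pvInc ns indeg).getD v 0 = indeg.getD v 0 + ns.count v := by
  exact PySem.Dict.getD_foldl_insert_add_one ns indeg v

-- PySem.List.dedup is the append-if-new fold
theorem dedup_eq_fold (xs : List String) :
    PySem.List.dedup xs = xs.foldl (fun o v => if v ∈ o then o else o ++ [v]) [] := by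
  have addfn : (PySem.Set.add : List String → String → List String)
      = fun o v => if v ∈ o then o else o ++ [v] := by
    funext o v
    by_cases h : v ∈ o
    · simp [PySem.Set.add_of_mem h, h]
    · simp [PySem.Set.add_of_not_mem h, h]
  simp only [PySem.List.dedup, PySem.Set.ofList, addfn, PySem.Set.empty]

-- B's dedup fold over the flattened vertex occurrences = entry-wise pvOrd
theorem ordFlat (l : List (String × List String)) (order : List String) :
    (l.flatMap (fun p => p.2 ++ [p.1])).foldl (fun o v => if v ∈ o then o else o ++ [v]) order
      = l.foldl (fun o p => pvOrd (p.2 ++ [p.1]) o) order := by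
  induction l generalizing order with
  | nil => rfl
  | cons p l ih =>
    rw [List.flatMap_cons, List.foldl_append, List.foldl_cons]
    exact ih (pvOrd (p.2 ++ [p.1]) order)

-- run-length invariant: on a sorted suffix whose elements all dominate the open run's
-- value p, the finished table reads off as counts
theorem runInv (ts : List String) (d : PySem.Dict String Int) (p : String) (r : Int)
    (hp : ts.Pairwise (· ≤ ·)) (hle : ∀ x ∈ ts, p ≤ x)
    (hd : ∀ x ∈ ts, x ≠ p → d.getD x 0 = 0) (v : String) :
    (pvFlush (ts.foldl pvRun (d, some p, r))).getD v 0 =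
      if v = p then r + ts.count p
      else if v ∈ ts then (ts.count v : Int)
      else d.getD v 0 := by
  induction ts generalizing d p r with
  | nil =>
    simp only [List.foldl_nil, pvFlush, List.count_nil, List.not_mem_nil, if_false]
    rw [PySem.Dict.getD_insert]
    by_cases hvp : v = p <;> simp [hvp]
  | cons a ts ih =>
    rw [List.foldl_cons]
    by_cases hap : p = a
    · subst hap
      rw [show pvRun (d, some p, r) p = (d, some p, r + 1) by simp [pvRun]]
      rw [ih d p (r + 1) hp.of_cons (fun x hx => hle x (List.mem_cons_of_mem p hx))
        (fun x hx hxa => hd x (List.mem_cons_of_mem p hx) hxa)]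
      simp only [List.count_cons, List.mem_cons, beq_iff_eq]
      by_cases hvp : v = p
      · subst hvp
        simp only [if_pos rfl]
        push_cast
        ring
      · have hpv : ¬ p = v := fun h => hvp h.symm
        simp [hvp, hpv]
    · have hpa : p < a := lt_of_le_of_ne (hle a (List.mem_cons_self)) hap
      have hta : ∀ x ∈ ts, a ≤ x := fun x hx => (List.pairwise_cons.mp hp).1 x hx
      have hpt : ∀ x ∈ ts, x ≠ p := fun x hx h => absurd (h ▸ hta x hx) (not_le.mpr hpa)
      have hnap : ¬ (a = p) := fun h => hap h.symm
      rw [show pvRun (d, some p, r) a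
          = (d.insert p r, some a, 1) by simp [pvRun, hnap]]
      rw [ih (d.insert p r) a 1 hp.of_cons hta
        (fun x hx _ => by
          rw [PySem.Dict.getD_insert, if_neg (hpt x hx)]
          exact hd x (List.mem_cons_of_mem a hx) (hpt x hx))]
      rw [PySem.Dict.getD_insert]
      have h0 : List.count p ts = 0 := List.count_eq_zero.mpr (fun h => hpt p h rfl)
      simp only [List.count_cons, List.mem_cons, beq_iff_eq]
      by_cases hvp : v = p
      · subst hvp
        have h1 : ¬ v = a := hap
        have h2 : ¬ a = v := fun h => h1 h.symm
        have hvts : v ∉ ts := fun h => hpt v h rfl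
        simp [h1, h2, hvts, h0]
      · by_cases hva : v = a
        · subst hva
          simp only [if_pos rfl, if_neg hvp, List.mem_cons, true_or, if_pos rfl]
          push_cast
          ring
        · have hav : ¬ a = v := fun h => hva h.symm
          simp [hvp, hva, hav]

-- the run-length table over sorted(xs) is the multiset count of xs
theorem indeg_eq_count (xs : List String) (v : String) :
    (pvFlush ((PySem.List.sorted xs (fun v => v) false).foldl pvRun
        (PySem.Dict.empty, none, 0))).getD v 0 = (xs.count v : Int) := by
  have hperm := PySem.List.sorted_perm xs (fun v => v) (rev := false)
  have hcnt : (PySem.List.sorted xs (fun v => v) false).count v = xs.count v :=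
    hperm.count_eq v
  rw [← hcnt]
  have hpw : (PySem.List.sorted xs (fun v => v) false).Pairwise (· ≤ ·) :=
    PySem.List.sorted_pairwise xs (fun v => v)
  cases hts : PySem.List.sorted xs (fun v => v) false with
  | nil => simp [pvFlush, PySem.Dict.getD]
  | cons t ts =>
    rw [hts] at hpw
    rw [List.foldl_cons]
    rw [show pvRun (PySem.Dict.empty, none, 0) t = (PySem.Dict.empty, some t, 1) by simp [pvRun]]
    rw [runInv ts PySem.Dict.empty t 1 hpw.of_cons
      (fun x hx => (List.pairwise_cons.mp hpw).1 x hx)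
      (fun x _ _ => by simp [PySem.Dict.getD, PySem.Dict.get?, PySem.Dict.empty]) v]
    simp only [List.count_cons, beq_iff_eq]
    by_cases hvt : v = t
    · subst hvt
      simp only [if_pos rfl]
      push_cast
      ring
    · have htv : ¬ t = v := fun h => hvt h.symm
      by_cases hvts : v ∈ ts
      · simp [hvt, hvts, htv]
      · simp [hvt, hvts, htv, List.count_eq_zero.mpr hvts,
          PySem.Dict.getD, PySem.Dict.get?, PySem.Dict.empty]

-- the accumulated in-degree table reads off as a count over the flattened target list
theorem getD_incFold (l : List (String × List String)) (d : PySem.Dict String Int) (v : String) :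
    (l.foldl (fun d p => pvInc p.2 d) d).getD v 0
      = d.getD v 0 + ((l.flatMap (fun p => p.2)).count v : Int) := by
  induction l generalizing d with
  | nil => simp
  | cons p l ih =>
    simp only [List.foldl_cons, List.flatMap_cons, List.count_append]
    rw [ih, getD_pvInc]
    push_cast
    ring

-- the main invariant: A's dict is always the order/indeg/outdeg tables, record-wise
theorem mainInv (l : List (String × List String)) (order : List String)
    (indeg outdeg : PySem.Dict String Int) (hnd : order.Nodup)
    (hin : ∀ v, v ∉ order → indeg.getD v 0 = 0) (hout : ∀ v, v ∉ order → outdeg.getD v 0 = 0) :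
    l.foldl pvStepA (PySem.Dict.mk (order.map (pvRecD indeg outdeg)))
      = PySem.Dict.mk ((l.foldl (fun o p => pvOrd (p.2 ++ [p.1]) o) order).map
          (pvRecD (l.foldl (fun d p => pvInc p.2 d) indeg)
            (l.foldl (fun d p => d.insert p.1 (p.2.length : Int)) outdeg))) := by
  induction l generalizing order indeg outdeg with
  | nil => rfl
  | cons p l ih =>
    simp only [List.foldl_cons]
    have hO : ∀ v ∈ p.2 ++ [p.1], v ∈ pvOrd (p.2 ++ [p.1]) order := by
      intro v hv
      exact (mem_pvOrd _ _ _).mpr (Or.inr hv)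
    have hndO : (pvOrd (p.2 ++ [p.1]) order).Nodup := nodup_pvOrd _ _ hnd
    have hstepA : pvStepA (PySem.Dict.mk (order.map (pvRecD indeg outdeg))) p
        = PySem.Dict.mk ((pvOrd (p.2 ++ [p.1]) order).map
            (pvRecD (pvInc p.2 indeg) (outdeg.insert p.1 (p.2.length : Int)))) := by
      simp only [pvStepA]
      rw [initA (p.2 ++ [p.1]) order indeg outdeg hin hout]
      rw [modify_out _ _ _ _ _ hndO (hO p.1 (by simp))]
      rw [incA p.2 _ _ _ hndO (fun v hv => hO v (List.mem_append.mpr (Or.inl hv)))]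
    have hin' : ∀ v, v ∉ pvOrd (p.2 ++ [p.1]) order → (pvInc p.2 indeg).getD v 0 = 0 := by
      intro v hv
      have hvo : v ∉ order := fun h => hv ((mem_pvOrd _ _ _).mpr (Or.inl h))
      have hvn : v ∉ p.2 := fun h => hv ((mem_pvOrd _ _ _).mpr (Or.inr (List.mem_append.mpr (Or.inl h))))
      rw [getD_pvInc, hin v hvo, List.count_eq_zero.mpr hvn]
      simp
    have hout' : ∀ v, v ∉ pvOrd (p.2 ++ [p.1]) order → (outdeg.insert p.1 (p.2.length : Int)).getD v 0 = 0 := by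
      intro v hv
      have hvp : v ≠ p.1 := fun h => hv ((mem_pvOrd _ _ _).mpr (Or.inr (List.mem_append.mpr (Or.inr (by simp [h])))))
      rw [PySem.Dict.getD_insert]
      rw [if_neg hvp]
      exact hout v (fun h => hv ((mem_pvOrd _ _ _).mpr (Or.inl h)))
    rw [hstepA]
    exact ih _ _ _ hndO hin' hout'

-- ===== VERDICT (by name: the statement is the Claim_ definition above) =====
theorem DegreeList_spec : Claim_equal_DegreeList := by
  intro adjList _
  unfold Spec_DegreeList DegreeList DegreeList_alt
  have h := mainInv adjList [] PySem.Dict.empty PySem.Dict.empty List.nodup_nil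
    (fun v _ => rfl) (fun v _ => rfl)
  have h0 : PySem.Dict.mk (([] : List String).map (pvRecD PySem.Dict.empty PySem.Dict.empty))
      = (PySem.Dict.empty : PySem.Dict String (PySem.Dict String Int)) := rfl
  rw [h0] at h
  rw [h, dedup_eq_fold, ordFlat]
  simp only [List.map_map]
  apply List.map_congr_left
  intro v hv
  simp only [Function.comp_apply, pvRecD]
  have hA : (adjList.foldl (fun d p => pvInc p.2 d) PySem.Dict.empty).getD v 0
      = ((adjList.flatMap (fun p => p.2)).count v : Int) := by
    rw [getD_incFold]; simp [PySem.Dict.getD]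
  have hB := indeg_eq_count (adjList.flatMap (fun p => p.2)) v
  simp only [hA, ← hB]
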